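-- pv_equiv track=rewrite | github.com/dafeng9920/GM-SkillForge | core/pack_and_permit.py | _get_final_gate_decision
-- ===== SOURCE A (Python) =====
-- from typing import Any, Optional
--
-- def _get_final_gate_decision(gate_decisions: list[dict[str, Any]]) -> dict[str, Any]:
--     """Determine final gate decision status."""
--     if not gate_decisions:
--         return {"status": "ALLOW"}
--
--     # Check for DENY
--     for decision in gate_decisions:
--         if decision.get("decision") == "DENY":
--             return {"status": "DENY", "gate": decision.get("gate_name")}
--
--     # Check for REQUIRES_CHANGES
--     for decision in gate_decisions:
--         if decision.get("decision") == "REQUIRES_CHANGES":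
--             return {"status": "REQUIRES_CHANGES", "gate": decision.get("gate_name")}
--
--     return {"status": "ALLOW"}
-- ===== SOURCE B (Python) =====
-- def _get_final_gate_decision(gate_decisions):
--     """Single pass: DENY returns immediately; remember the first REQUIRES_CHANGES gate."""
--     first_rc = None  # (gate_name,) of the first REQUIRES_CHANGES seen, or None
--     for decision in gate_decisions:
--         d = decision.get("decision")
--         if d == "DENY":
--             return {"status": "DENY", "gate": decision.get("gate_name")}
--         if d == "REQUIRES_CHANGES" and first_rc is None:
--             first_rc = (decision.get("gate_name"),)
--     if first_rc is not None:
--         return {"status": "REQUIRES_CHANGES", "gate": first_rc[0]}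
--     return {"status": "ALLOW"}
-- ===== Notes on version B (the rewrite author's own statement) =====
-- stated objective: simpler
-- what changed: Replaced A's two sequential scans (one looking for DENY, then a second looking for REQUIRES_CHANGES) by a single pass that returns on the first DENY and remembers the first-seen REQUIRES_CHANGES gate in a local variable.
import Mathlib
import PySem

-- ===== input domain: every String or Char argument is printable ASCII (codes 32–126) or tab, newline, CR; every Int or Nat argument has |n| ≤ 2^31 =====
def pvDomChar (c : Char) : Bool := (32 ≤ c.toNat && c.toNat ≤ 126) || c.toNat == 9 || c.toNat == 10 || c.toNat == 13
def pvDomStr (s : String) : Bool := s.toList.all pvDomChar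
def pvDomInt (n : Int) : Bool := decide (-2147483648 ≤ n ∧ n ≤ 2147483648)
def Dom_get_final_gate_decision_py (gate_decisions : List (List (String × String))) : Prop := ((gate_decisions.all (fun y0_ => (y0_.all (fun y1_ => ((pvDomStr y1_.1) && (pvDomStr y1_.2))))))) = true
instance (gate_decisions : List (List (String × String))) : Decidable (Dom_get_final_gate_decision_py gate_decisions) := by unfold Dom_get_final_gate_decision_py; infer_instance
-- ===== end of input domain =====

-- B replaces A's two sequential scans by one pass that remembers the first REQUIRES_CHANGES gate (objective: simpler).
-- In Python, B returns exactly A's value on EVERY input, including dicts without a "gate_name" key;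
-- Pre_ below only excludes inputs whose (shared) result is unrepresentable in the Lean return type.

-- shared primitive: Python's decision.get("decision") on a dict given as an association list
def pvDec (d : List (String × String)) : Option String := (PySem.Dict.ofList d).get? "decision"
-- Python's decision.get("gate_name"); Pre_ guarantees the key is present, so the "" default is never the result
def pvGate (d : List (String × String)) : String := (PySem.Dict.ofList d).getD "gate_name" ""

-- ===== PORT A =====
-- first loop: "Check for DENY"
def pvLoopDeny : List (List (String × String)) → Option (List (String × String))
  | [] => none
  | d :: rest =>
    if pvDec d = some "DENY" then some [("status", "DENY"), ("gate", pvGate d)]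
    else pvLoopDeny rest

-- second loop: "Check for REQUIRES_CHANGES"
def pvLoopReq : List (List (String × String)) → Option (List (String × String))
  | [] => none
  | d :: rest =>
    if pvDec d = some "REQUIRES_CHANGES" then some [("status", "REQUIRES_CHANGES"), ("gate", pvGate d)]
    else pvLoopReq rest

def get_final_gate_decision_py (gate_decisions : List (List (String × String))) : List (String × String) :=
  if gate_decisions = [] then [("status", "ALLOW")]
  else
    match pvLoopDeny gate_decisions with
    | some r => r
    | none =>
      match pvLoopReq gate_decisions with
      | some r => r
      | none => [("status", "ALLOW")]

-- ===== PORT B =====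
-- single pass; the accumulator is the first-seen REQUIRES_CHANGES gate (none = not seen yet)
def pvLoopB : List (List (String × String)) → Option String → List (String × String)
  | [], none => [("status", "ALLOW")]
  | [], some g => [("status", "REQUIRES_CHANGES"), ("gate", g)]
  | d :: rest, req =>
    if pvDec d = some "DENY" then [("status", "DENY"), ("gate", pvGate d)]
    else if pvDec d = some "REQUIRES_CHANGES" ∧ req = none then pvLoopB rest (some (pvGate d))
    else pvLoopB rest req

def get_final_gate_decision_py_alt (gate_decisions : List (List (String × String))) : List (String × String) :=
  pvLoopB gate_decisions none

-- ===== PRECONDITION & SPEC =====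
-- In Python, A and B return the SAME value on every input. Pre_ excludes only the inputs whose
-- common result cannot be REPRESENTED under this file's required return type dict[str, str] =
-- List (String × String): when a dict with decision DENY or REQUIRES_CHANGES lacks the "gate_name"
-- key, both programs return {'gate': None}, and Python None is not a str, so no faithful typed
-- port exists there. The exclusion is purely representational, not a behavioural carve-out.
def Pre_get_final_gate_decision_py (gate_decisions : List (List (String × String))) : Prop :=
  (gate_decisions.all (fun d =>
    let dd := PySem.Dict.ofList d
    if dd.get? "decision" = some "DENY" ∨ dd.get? "decision" = some "REQUIRES_CHANGES"
    then dd.contains "gate_name" else true)) = true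
instance (gate_decisions : List (List (String × String))) : Decidable (Pre_get_final_gate_decision_py gate_decisions) := by
  unfold Pre_get_final_gate_decision_py; infer_instance

def pvWitness_get_final_gate_decision_py : (List (List (String × String))) :=
  [[("decision", "REQUIRES_CHANGES"), ("gate_name", "lint")], [("decision", "ALLOW"), ("gate_name", "sec")]]

def Spec_get_final_gate_decision_py (gate_decisions : List (List (String × String))) (out : List (String × String)) : Prop := out = get_final_gate_decision_py_alt gate_decisions
instance (gate_decisions : List (List (String × String))) (out : List (String × String)) : Decidable (Spec_get_final_gate_decision_py gate_decisions out) := by unfold Spec_get_final_gate_decision_py; infer_instance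

-- ===== CLAIM (what is proved, stated in full; the proofs are below) =====
def Claim_equal_get_final_gate_decision_py : Prop := ∀ (gate_decisions : List (List (String × String))), Dom_get_final_gate_decision_py gate_decisions → Pre_get_final_gate_decision_py gate_decisions → Spec_get_final_gate_decision_py gate_decisions (get_final_gate_decision_py gate_decisions)

-- ===== LEMMAS AND PROOFS =====

-- The one-pass loop, started with accumulator `req`, equals: first DENY wins; otherwise `req`
-- (if already set) or the first REQUIRES_CHANGES of the remaining list; otherwise ALLOW.
theorem pvLoopB_eq (gds : List (List (String × String))) : ∀ req : Option String,
    pvLoopB gds req =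
      match pvLoopDeny gds with
      | some r => r
      | none =>
        match req with
        | some g => [("status", "REQUIRES_CHANGES"), ("gate", g)]
        | none =>
          match pvLoopReq gds with
          | some r => r
          | none => [("status", "ALLOW")] := by
  induction gds with
  | nil => intro req; cases req <;> rfl
  | cons d rest ih =>
    intro req
    by_cases hD : pvDec d = some "DENY"
    · simp [pvLoopB, pvLoopDeny, hD]
    · by_cases hR : pvDec d = some "REQUIRES_CHANGES"
      · cases req with
        | none => simp [pvLoopB, pvLoopDeny, pvLoopReq, hR, ih]
        | some g => simp [pvLoopB, pvLoopDeny, hR, ih]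
      · simp [pvLoopB, pvLoopDeny, pvLoopReq, hD, hR, ih]

-- ===== VERDICT (by name: the statement is the Claim_ definition above) =====
theorem get_final_gate_decision_py_spec : Claim_equal_get_final_gate_decision_py := by
  intro gds _ _
  unfold Spec_get_final_gate_decision_py get_final_gate_decision_py get_final_gate_decision_py_alt
  rw [pvLoopB_eq]
  cases gds with
  | nil => rfl
  | cons d rest => simp
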